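-- pv_equiv track=rewrite | github.com/pc5401/my_BOJ | 백준/Silver/2108. 통계학/통계학.py | mode_func
-- ===== SOURCE A (Python) =====
-- from collections import defaultdict
--
-- def mode_func(lst:list):
--     dct = defaultdict()
--
--     for l in lst:
--         if l in dct:
--             dct[l] += 1
--         else:
--             dct[l] = 1
--     maxV = 0
--     res = []
--     for d in dct:
--         item = dct[d]
--         if item > maxV:
--             maxV = item
--             res= []
--             res.append(d)
--         elif item == maxV:
--             res.append(d)
--
--     if len(res) == 1:
--         return res[0]
--
--     else:
--         result = sorted(res)
--         return result[1]
-- ===== SOURCE B (Python) =====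
-- def mode_func(lst: list):
--     # Sort once, then scan runs of equal values; ties collects max-frequency
--     # values in ascending order, so no final sort is needed.
--     s = sorted(lst)
--     maxV = 0
--     ties = []
--     i = 0
--     n = len(s)
--     while i < n:
--         j = i + 1
--         while j < n and s[j] == s[i]:
--             j += 1
--         run = j - i
--         if run > maxV:
--             maxV = run
--             ties = [s[i]]
--         elif run == maxV:
--             ties.append(s[i])
--         i = j
--     return ties[0] if len(ties) == 1 else ties[1]
-- ===== Notes on version B (the rewrite author's own statement) =====
-- stated objective: alternative
-- what changed: B sorts the list once and scans runs of equal values, collecting max-frequency values already in ascending order, instead of A's dict counting, key scan, and final sort of the tied values.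
import Mathlib
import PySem

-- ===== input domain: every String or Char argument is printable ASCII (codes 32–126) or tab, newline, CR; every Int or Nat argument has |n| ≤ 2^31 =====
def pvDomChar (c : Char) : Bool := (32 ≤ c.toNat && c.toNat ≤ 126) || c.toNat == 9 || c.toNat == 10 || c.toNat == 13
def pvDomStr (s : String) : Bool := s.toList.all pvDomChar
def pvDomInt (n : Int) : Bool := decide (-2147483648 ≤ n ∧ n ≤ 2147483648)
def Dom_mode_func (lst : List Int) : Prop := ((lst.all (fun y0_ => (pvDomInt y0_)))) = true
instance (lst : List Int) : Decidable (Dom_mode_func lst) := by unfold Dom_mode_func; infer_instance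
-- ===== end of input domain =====

-- B replaces A's dict-count + second key-scan + final sort by a single run-length
-- scan over one sorted copy of the input (ties come out already ascending); same
-- return value wherever A returns.

-- ===== PORT A =====
def mode_func (lst : List Int) : Int :=
  let dct := lst.foldl
    (fun d l => if d.contains l then d.insert l (d.getD l 0 + 1) else d.insert l 1)
    PySem.Dict.empty
  let mr := dct.keys.foldl
    (fun s d =>
      if dct.getD d 0 > s.1 then (dct.getD d 0, [d])
      else if dct.getD d 0 = s.1 then (s.1, s.2 ++ [d])
      else s)
    ((0 : Int), ([] : List Int))
  if mr.2.length = 1 then (PySem.List.pyGet? mr.2 0).getD 0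
  else (PySem.List.pyGet? (PySem.List.sorted mr.2 (fun x => x)) 1).getD 0

-- ===== PORT B =====
-- the run scan of Source B: leading run of equal values (inner while), then the rest
def bScan : List Int → Int → List Int → Int × List Int
  | [], m, t => (m, t)
  | x :: xs, m, t =>
    let run : Int := 1 + (xs.takeWhile (fun y => y == x)).length
    let rest := xs.dropWhile (fun y => y == x)
    if run > m then bScan rest run [x]
    else if run = m then bScan rest m (t ++ [x])
    else bScan rest m t
termination_by s _ _ => s.length
decreasing_by
  all_goals
    exact Nat.lt_succ_of_le (List.length_dropWhile_le (fun y => y == x) xs)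

def mode_func_alt (lst : List Int) : Int :=
  let s := PySem.List.sorted lst (fun x => x)
  let mt := bScan s 0 []
  if mt.2.length = 1 then (PySem.List.pyGet? mt.2 0).getD 0
  else (PySem.List.pyGet? mt.2 1).getD 0

-- ===== PRECONDITION & SPEC =====
-- Pre_ excludes only the empty list, on which A raises IndexError (res[1] on []).
def Pre_mode_func (lst : List Int) : Prop := lst ≠ []
instance (lst : List Int) : Decidable (Pre_mode_func lst) := by unfold Pre_mode_func; infer_instance
def pvWitness_mode_func : List Int := ([1, 2, 2, 3])

def Spec_mode_func (lst : List Int) (out : Int) : Prop := out = mode_func_alt lst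
instance (lst : List Int) (out : Int) : Decidable (Spec_mode_func lst out) := by unfold Spec_mode_func; infer_instance

-- ===== CLAIM (what is proved, stated in full; the proofs are below) =====
def Claim_equal_mode_func : Prop := ∀ (lst : List Int), Dom_mode_func lst → Pre_mode_func lst → Spec_mode_func lst (mode_func lst)

-- ===== LEMMAS AND PROOFS =====

-- the common "collect the argmaxes" fold step, abstracted over the score f
def amStep (f : Int → Int) (s : Int × List Int) (k : Int) : Int × List Int :=
  if f k > s.1 then (f k, [k])
  else if f k = s.1 then (s.1, s.2 ++ [k])
  else s

def runMax (f : Int → Int) (ks : List Int) (m : Int) : Int :=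
  ks.foldl (fun a k => max a (f k)) m

theorem runMax_cons (f : Int → Int) (k : Int) (ks : List Int) (m : Int) :
    runMax f (k :: ks) m = runMax f ks (max m (f k)) := rfl

theorem amFold (f : Int → Int) :
    ∀ (ks : List Int) (m : Int) (r : List Int),
      ks.foldl (amStep f) (m, r) =
        (runMax f ks m,
         (if m = runMax f ks m then r else [])
           ++ ks.filter (fun k => decide (f k = runMax f ks m))) := by
  intro ks
  induction ks with
  | nil => intro m r; simp [runMax]
  | cons k ks ih =>
    intro m r
    have hbound := PySem.List.le_foldl_max_int ks f
    by_cases h1 : f k > m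
    · have hM : runMax f (k :: ks) m = runMax f ks (f k) := by
        rw [runMax_cons]; congr 1; omega
      have hfk : f k ≤ runMax f ks (f k) := (hbound (f k)).1
      have e1 : amStep f (m, r) k = (f k, [k]) := by
        unfold amStep; rw [if_pos h1]
      rw [List.foldl_cons, e1, ih, hM]
      have hmM : ¬ m = runMax f ks (f k) := by omega
      rw [if_neg hmM, List.filter_cons]
      by_cases h2 : f k = runMax f ks (f k)
      · have hd : decide (f k = runMax f ks (f k)) = true := by
          simp only [decide_eq_true_eq]; omega
        rw [hd, if_pos h2]
        simp
      · have hd : decide (f k = runMax f ks (f k)) = false := by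
          simp only [decide_eq_false_iff_not]; omega
        rw [hd, if_neg h2]
        simp
    · have hM : runMax f (k :: ks) m = runMax f ks m := by
        rw [runMax_cons]; congr 1; omega
      have hm : m ≤ runMax f ks m := (hbound m).1
      by_cases h2 : f k = m
      · have e1 : amStep f (m, r) k = (m, r ++ [k]) := by
          unfold amStep; rw [if_neg h1, if_pos h2]
        rw [List.foldl_cons, e1, ih, hM, List.filter_cons]
        by_cases h3 : m = runMax f ks m
        · have hd : decide (f k = runMax f ks m) = true := by
            simp only [decide_eq_true_eq]; omega
          rw [hd, if_pos h3, if_pos h3]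
          simp
        · have hd : decide (f k = runMax f ks m) = false := by
            simp only [decide_eq_false_iff_not]; omega
          rw [hd, if_neg h3, if_neg h3]
          simp
      · have h1' : f k < m := by omega
        have e1 : amStep f (m, r) k = (m, r) := by
          unfold amStep; rw [if_neg h1, if_neg h2]
        have hd : decide (f k = runMax f ks m) = false := by
          simp only [decide_eq_false_iff_not]; omega
        rw [List.foldl_cons, e1, ih, hM, List.filter_cons, hd]
        simp

theorem runMax_perm (f : Int → Int) {l₁ l₂ : List Int} (h : l₁.Perm l₂) (m : Int) :
    runMax f l₁ m = runMax f l₂ m := by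
  unfold runMax
  induction h generalizing m with
  | nil => rfl
  | cons x _ ih => simp [ih]
  | swap x y l =>
    simp only [List.foldl_cons]
    have : max (max m (f y)) (f x) = max (max m (f x)) (f y) := by omega
    rw [this]
  | trans _ _ ih₁ ih₂ => rw [ih₁, ih₂]

-- A's counting loop builds exactly Counter(lst)
theorem afold_counter (lst : List Int) :
    lst.foldl
      (fun d l => if d.contains l then d.insert l (d.getD l 0 + 1) else d.insert l 1)
      PySem.Dict.empty = PySem.Dict.counter lst := by
  rw [← PySem.Dict.foldl_insert_getD_add_one_eq_counter]
  apply PySem.List.foldl_congr_mem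
  intro d l _
  by_cases h : d.contains l
  · simp [h]
  · have h0 : d.getD l 0 = 0 :=
      PySem.Dict.getD_of_not_contains d 0 (by simpa using h)
    simp [h, h0]

theorem set_add_mem (s : List Int) (z : Int) (h : z ∈ s) : PySem.Set.add s z = s := by
  simp [PySem.Set.add, PySem.Set.contains, h]

theorem set_add_not_mem (s : List Int) (z : Int) (h : z ∉ s) :
    PySem.Set.add s z = s ++ [z] := by
  simp [PySem.Set.add, PySem.Set.contains, h]

-- ordered dedup of a cons: head, then the dedup of the tail with the head removed
theorem foldl_add_cons (x : Int) :
    ∀ (l acc : List Int), x ∉ acc →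
      l.foldl PySem.Set.add (x :: acc) =
        x :: (l.filter (fun y => !(y == x))).foldl PySem.Set.add acc := by
  intro l
  induction l with
  | nil => intro acc _; simp
  | cons y l ih =>
    intro acc hx
    by_cases hy : y = x
    · subst hy
      rw [List.foldl_cons, set_add_mem _ _ (List.mem_cons_self), List.filter_cons,
          if_neg (by simp)]
      exact ih acc hx
    · by_cases hm : y ∈ acc
      · rw [List.foldl_cons, set_add_mem _ _ (List.mem_cons_of_mem _ hm),
            List.filter_cons, if_pos (by simp [hy]), List.foldl_cons,
            set_add_mem _ _ hm]
        exact ih acc hx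
      · have hm' : y ∉ x :: acc := by simp [hy, hm]
        rw [List.foldl_cons, set_add_not_mem _ _ hm', List.filter_cons,
            if_pos (by simp [hy]), List.foldl_cons, set_add_not_mem _ _ hm]
        have hx' : x ∉ acc ++ [y] := by simp [hx, Ne.symm hy]
        have := ih (acc ++ [y]) hx'
        simpa using this

theorem ofList_cons (x : Int) (xs : List Int) :
    PySem.Set.ofList (x :: xs) =
      x :: PySem.Set.ofList (xs.filter (fun y => !(y == x))) := by
  rw [PySem.Set.ofList_eq_foldl, PySem.Set.ofList_eq_foldl, List.foldl_cons,
      set_add_not_mem [] x (by simp)]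
  exact foldl_add_cons x xs [] (by simp)

-- head-run structure of a sorted list
theorem sorted_run (x : Int) :
    ∀ (xs : List Int), (∀ y ∈ xs, x ≤ y) → xs.Pairwise (· ≤ ·) →
      (xs.takeWhile (fun y => y == x)).length = xs.count x ∧
      xs.dropWhile (fun y => y == x) = xs.filter (fun y => !(y == x)) := by
  intro xs
  induction xs with
  | nil => intro _ _; simp
  | cons y ys ih =>
    intro hle hp
    by_cases hy : y = x
    · subst hy
      have h1 := ih (fun z hz => hle z (List.mem_cons_of_mem _ hz)) hp.of_cons
      refine ⟨?_, ?_⟩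
      · rw [List.takeWhile_cons, if_pos (by simp), List.length_cons, h1.1,
            List.count_cons_self]
      · rw [List.dropWhile_cons, if_pos (by simp), List.filter_cons,
            if_neg (by simp), h1.2]
    · have hxy : x < y := lt_of_le_of_ne (hle y List.mem_cons_self) (Ne.symm hy)
      have hall : ∀ z ∈ y :: ys, z ≠ x := by
        intro z hz
        rcases List.mem_cons.mp hz with h | h
        · omega
        · have : y ≤ z := (List.pairwise_cons.mp hp).1 z h
          omega
      refine ⟨?_, ?_⟩
      · rw [List.takeWhile_cons, if_neg (by simp [hy])]
        symm
        rw [List.length_nil, List.count_eq_zero]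
        intro h; exact hall x h rfl
      · rw [List.dropWhile_cons, if_neg (by simp [hy])]
        symm
        rw [List.filter_eq_self]
        intro z hz
        simp [hall z hz]

-- B's scan over a sorted list is the argmax fold over its distinct values, scored by count
theorem bScan_eq : ∀ (s : List Int), s.Pairwise (· ≤ ·) → ∀ (m : Int) (t : List Int),
    bScan s m t =
      (PySem.Set.ofList s).foldl (amStep (fun v => (s.count v : Int))) (m, t)
  | [], _, m, t => by simp [bScan, PySem.Set.ofList]
  | x :: xs, h, m, t => by
    have hle : ∀ y ∈ xs, x ≤ y := (List.pairwise_cons.mp h).1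
    have hr := sorted_run x xs hle h.of_cons
    have hrest_sorted : (xs.filter (fun y => !(y == x))).Pairwise (· ≤ ·) :=
      h.of_cons.sublist List.filter_sublist
    have hrun : (1 : Int) + (xs.takeWhile (fun y => y == x)).length
        = ((x :: xs).count x : Int) := by
      rw [hr.1, List.count_cons_self]; push_cast; omega
    have hstep : ∀ (acc : Int × List Int),
        ∀ v ∈ PySem.Set.ofList (xs.filter (fun y => !(y == x))),
        amStep (fun v => ((xs.filter (fun y => !(y == x))).count v : Int)) acc v
          = amStep (fun v => ((x :: xs).count v : Int)) acc v := by
      intro acc v hv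
      have hv' : v ∈ xs.filter (fun y => !(y == x)) :=
        (PySem.Set.mem_ofList _ v).mp hv
      have hvx : v ≠ x := by
        have := (List.mem_filter.mp hv').2
        simpa using this
      have hcnt : ((xs.filter (fun y => !(y == x))).count v : Int)
          = ((x :: xs).count v : Int) := by
        have e1 : (xs.filter (fun y => !(y == x))).count v = xs.count v :=
          List.count_filter (by simp [hvx])
        have e2 : (x :: xs).count v = xs.count v := by
          rw [List.count_cons]
          simp [Ne.symm hvx]
        rw [e1, e2]
      simp only [amStep, hcnt]
    have ih := bScan_eq (xs.filter (fun y => !(y == x))) hrest_sorted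
    rw [ofList_cons]
    simp only [bScan, hr.2, hrun, List.foldl_cons]
    by_cases h1 : ((x :: xs).count x : Int) > m
    · rw [if_pos h1, ih]
      rw [PySem.List.foldl_congr_mem _ _ _ _ hstep]
      simp only [amStep, if_pos h1]
    · rw [if_neg h1]
      by_cases h2 : ((x :: xs).count x : Int) = m
      · rw [if_pos h2, ih]
        rw [PySem.List.foldl_congr_mem _ _ _ _ hstep]
        simp only [amStep, if_neg h1, if_pos h2]
      · rw [if_neg h2, ih]
        rw [PySem.List.foldl_congr_mem _ _ _ _ hstep]
        simp only [amStep, if_neg h1, if_neg h2]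
termination_by s => s.length
decreasing_by
  exact Nat.lt_succ_of_le (List.length_filter_le _ xs)

-- ordered dedup is a sublist (used for Pairwise on the distinct values)
theorem foldl_add_sublist :
    ∀ (l acc : List Int), ∃ d, l.foldl PySem.Set.add acc = acc ++ d ∧ d.Sublist l := by
  intro l
  induction l with
  | nil => intro acc; exact ⟨[], by simp, by simp⟩
  | cons x l ih =>
    intro acc
    by_cases hc : x ∈ acc
    · obtain ⟨d, hd, hs⟩ := ih acc
      refine ⟨d, ?_, hs.cons x⟩
      rw [List.foldl_cons, set_add_mem _ _ hc, hd]
    · obtain ⟨d, hd, hs⟩ := ih (acc ++ [x])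
      refine ⟨x :: d, ?_, hs.cons₂ x⟩
      rw [List.foldl_cons, set_add_not_mem _ _ hc, hd, List.append_assoc,
          List.singleton_append]

theorem ofList_sublist (l : List Int) : (PySem.Set.ofList l).Sublist l := by
  obtain ⟨d, hd, hs⟩ := foldl_add_sublist l []
  rw [PySem.Set.ofList_eq_foldl, hd]
  simpa using hs

-- ===== VERDICT (by name: the statement is the Claim_ definition above) =====
theorem mode_func_spec : Claim_equal_mode_func := by
  intro lst _ _
  unfold Spec_mode_func mode_func mode_func_alt
  set c : Int → Int := fun v => (lst.count v : Int) with hc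
  -- A side
  simp only [afold_counter]
  have hstepA : ∀ (acc : Int × List Int), ∀ d ∈ (PySem.Dict.counter lst).keys,
      (if (PySem.Dict.counter lst).getD d 0 > acc.1 then ((PySem.Dict.counter lst).getD d 0, [d])
       else if (PySem.Dict.counter lst).getD d 0 = acc.1 then (acc.1, acc.2 ++ [d])
       else acc) = amStep c acc d := by
    intro acc d _
    simp only [amStep, PySem.Dict.getD_counter, hc]
  rw [PySem.List.foldl_congr_mem _ _ _ _ hstepA]
  rw [PySem.Dict.keys_counter, amFold]
  -- B side
  have hsp : (PySem.List.sorted lst (fun x => x)).Perm lst :=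
    PySem.List.sorted_perm lst (fun x => x) false
  have hcount_eq : (fun v => (((PySem.List.sorted lst (fun x => x)).count v : Int))) = c := by
    funext v; rw [hc]
    exact_mod_cast congrArg Int.ofNat (hsp.count_eq v)
  rw [bScan_eq _ (PySem.List.sorted_pairwise lst (fun x => x)), hcount_eq, amFold]
  -- the two distinct-value lists are permutations of each other
  set ksA := PySem.Set.ofList lst with hksA
  set ksB := PySem.Set.ofList (PySem.List.sorted lst (fun x => x)) with hksB
  have hperm : ksB.Perm ksA := by
    rw [List.perm_ext_iff_of_nodup (PySem.Set.nodup_ofList _) (PySem.Set.nodup_ofList _)]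
    intro a
    rw [PySem.Set.mem_ofList, PySem.Set.mem_ofList]
    exact hsp.mem_iff
  have hM : runMax c ksB 0 = runMax c ksA 0 := runMax_perm c hperm 0
  rw [hM]
  set M := runMax c ksA 0 with hMdef
  set resA := ksA.filter (fun k => decide (c k = M)) with hresA
  set resB := ksB.filter (fun k => decide (c k = M)) with hresB
  have hpermres : resB.Perm resA := hperm.filter _
  -- resB is strictly increasing
  have hBlt : resB.Pairwise (· < ·) := by
    have hle : ksB.Pairwise (· ≤ ·) :=
      (PySem.List.sorted_pairwise lst (fun x => x)).sublist (ofList_sublist _)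
    have hnd : ksB.Nodup := PySem.Set.nodup_ofList _
    have hklt : ksB.Pairwise (· < ·) := by
      refine (hle.and hnd).imp ?_
      intro a b hab; exact lt_of_le_of_ne hab.1 hab.2
    exact hklt.sublist List.filter_sublist
  have hsorted : PySem.List.sorted resA (fun x => x) = resB :=
    PySem.List.sorted_eq_of_perm_of_pairwise_lt resA resB (fun x => x) hpermres hBlt
  have hlen : resA.length = resB.length := hpermres.length_eq.symm
  simp only [ite_self, List.nil_append]
  by_cases hl : resA.length = 1
  · rw [if_pos hl, if_pos (by omega)]
    obtain ⟨a, ha⟩ := List.length_eq_one_iff.mp hl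
    have hb : resB = [a] := List.perm_singleton.mp (ha ▸ hpermres)
    rw [ha, hb]
  · rw [if_neg hl, if_neg (by omega), hsorted]
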